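-- pv_equiv track=rewrite | github.com/David-111409/Python-Problem-Solving | problrm5.py | mangle
-- ===== SOURCE A (Python) =====
-- def mangle(string):
--     new_string = ""
--
--     for c in string:
--         if c.lower() == "z" :
--             new_string += "A"
--
--         else:
--             if c.isalpha():
--                 letter = chr(ord(c) + 1)
--
--                 if letter in "aeiou":
--                     new_string += letter.upper()
--                 else:
--                     new_string += letter
--
--             else:
--                 new_string += c
--
--     return new_string
-- ===== SOURCE B (Python) =====
-- _LETTERS = "abcdefghijklmnopqrstuvwxyzABCDEFGHIJKLMNOPQRSTUVWXYZ"
--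
--
-- def _image(c):
--     if c in "zZ":
--         return "A"
--     letter = chr(ord(c) + 1)
--     return letter.upper() if letter in "aeiou" else letter
--
--
-- _TABLE = str.maketrans({c: _image(c) for c in _LETTERS})
--
--
-- def mangle(string):
--     return string.translate(_TABLE)
-- ===== Notes on version B (the rewrite author's own statement) =====
-- stated objective: idiomatic
-- what changed: Replaced the per-character branching loop with a 52-entry translation table built once from the ASCII letters and a single str.translate pass.
import Mathlib
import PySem

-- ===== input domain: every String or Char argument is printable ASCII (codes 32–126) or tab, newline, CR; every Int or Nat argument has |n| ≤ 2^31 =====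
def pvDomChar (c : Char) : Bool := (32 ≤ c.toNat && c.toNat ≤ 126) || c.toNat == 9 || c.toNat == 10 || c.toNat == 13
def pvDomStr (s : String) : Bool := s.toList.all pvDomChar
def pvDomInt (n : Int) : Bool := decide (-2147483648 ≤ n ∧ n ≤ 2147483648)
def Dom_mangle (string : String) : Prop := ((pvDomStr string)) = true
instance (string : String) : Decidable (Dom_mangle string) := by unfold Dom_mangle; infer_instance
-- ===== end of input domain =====

-- B replaces A's per-character branching loop with a translation table built once
-- from the 52 ASCII letters and a single lookup pass (str.translate); objective: idiomatic.

-- ===== PORT A =====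
-- literal transliteration of A: fold over the characters, appending per-branch
def mangle (string : String) : String :=
  String.ofList (string.toList.foldl (fun new_string c =>
    if PySem.Chars.lowerChar c == 'z' then
      new_string ++ ['A']
    else
      if PySem.Chars.isalpha c then
        let letter := Char.ofNat (c.toNat + 1)
        if List.elem letter "aeiou".toList then
          new_string ++ [PySem.Chars.upperChar letter]
        else
          new_string ++ [letter]
      else
        new_string ++ [c]) [])

-- ===== PORT B =====
-- Source B's letter list and per-letter image
def pvLetters : List Char := "abcdefghijklmnopqrstuvwxyzABCDEFGHIJKLMNOPQRSTUVWXYZ".toList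

def pvImage (c : Char) : Char :=
  if List.elem c "zZ".toList then 'A'
  else
    let letter := Char.ofNat (c.toNat + 1)
    if List.elem letter "aeiou".toList then PySem.Chars.upperChar letter else letter

-- the translation table built once ({c: _image(c) for c in _LETTERS})
def pvTable : PySem.Dict Char Char :=
  pvLetters.foldl (fun d c => d.insert c (pvImage c)) PySem.Dict.empty

-- str.translate: each character is replaced by its table image, unmapped ones pass through
def mangle_alt (string : String) : String :=
  String.ofList (string.toList.map (fun c => pvTable.getD c c))

-- ===== PRECONDITION & SPEC =====
def Spec_mangle (string : String) (out : String) : Prop := out = mangle_alt string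
instance (string : String) (out : String) : Decidable (Spec_mangle string out) := by unfold Spec_mangle; infer_instance

-- ===== CLAIM (what is proved, stated in full; the proofs are below) =====
def Claim_equal_mangle : Prop := ∀ (string : String), Dom_mangle string → Spec_mangle string (mangle string)

-- ===== LEMMAS AND PROOFS =====

-- the character A's loop body appends, as a function
def pvStepA (c : Char) : Char :=
  if PySem.Chars.lowerChar c == 'z' then 'A'
  else
    if PySem.Chars.isalpha c then
      let letter := Char.ofNat (c.toNat + 1)
      if List.elem letter "aeiou".toList then PySem.Chars.upperChar letter else letter
    else c

theorem pvFoldA_eq_map (l : List Char) (acc : List Char) :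
    l.foldl (fun new_string c =>
      if PySem.Chars.lowerChar c == 'z' then
        new_string ++ ['A']
      else
        if PySem.Chars.isalpha c then
          let letter := Char.ofNat (c.toNat + 1)
          if List.elem letter "aeiou".toList then
            new_string ++ [PySem.Chars.upperChar letter]
          else
            new_string ++ [letter]
        else
          new_string ++ [c]) acc = acc ++ l.map pvStepA := by
  induction l generalizing acc with
  | nil => simp
  | cons c l ih =>
    simp only [List.foldl_cons, List.map_cons, ih, pvStepA]
    split_ifs <;> simp

-- on every ASCII code the two per-character transforms agree (checked exhaustively)
theorem pvStep_eq_ofNat : ∀ n : Fin 127,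
    pvStepA (Char.ofNat n.val) = pvTable.getD (Char.ofNat n.val) (Char.ofNat n.val) := by
  set_option maxRecDepth 4000 in decide

theorem pvStep_eq (c : Char) (h : pvDomChar c = true) :
    pvStepA c = pvTable.getD c c := by
  have hle : c.toNat ≤ 126 := by
    unfold pvDomChar at h
    simp only [Bool.or_eq_true, Bool.and_eq_true, decide_eq_true_eq, beq_iff_eq] at h
    omega
  have := pvStep_eq_ofNat ⟨c.toNat, by omega⟩
  simpa [Char.ofNat_toNat] using this

-- ===== VERDICT (by name: the statement is the Claim_ definition above) =====
theorem mangle_spec : Claim_equal_mangle := by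
  intro s hdom
  unfold Spec_mangle mangle mangle_alt
  rw [pvFoldA_eq_map]
  simp only [List.nil_append]
  have hmap : s.toList.map pvStepA = s.toList.map (fun c => pvTable.getD c c) := by
    apply List.map_congr_left
    intro c hc
    have hd : pvDomChar c = true := by
      have := (List.all_eq_true.mp hdom) c hc
      simpa using this
    exact pvStep_eq c hd
  rw [hmap]
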